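-- pv_equiv track=rewrite | github.com/ddbj/ddbj-search-converter | ddbj_search_converter/dblink/jga.py | join_relations
-- ===== SOURCE A (Python) =====
-- from collections import defaultdict
--
-- def join_relations(
--     ab: set[tuple[str, str]],
--     bc: set[tuple[str, str]],
-- ) -> set[tuple[str, str]]:
--     """(a, b) と (b, c) を join して (a, c) を返す。"""
--     b_to_c: dict[str, set[str]] = defaultdict(set)
--     for b, c in bc:
--         b_to_c[b].add(c)
--
--     return {(a, c) for a, b in ab for c in b_to_c.get(b, ())}
-- ===== SOURCE B (Python) =====
-- def join_relations(
--     ab: set[tuple[str, str]],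
--     bc: set[tuple[str, str]],
-- ) -> set[tuple[str, str]]:
--     """(a, b) と (b, c) を join して (a, c) を返す。"""
--     return {(a, c) for (a, b1) in ab for (b2, c) in bc if b1 == b2}
-- ===== Notes on version B (the rewrite author's own statement) =====
-- stated objective: simpler
-- what changed: Drops the defaultdict b->set(c) index entirely and computes the join as one nested set comprehension over ab x bc keeping pairs whose middle components match.
import Mathlib
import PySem

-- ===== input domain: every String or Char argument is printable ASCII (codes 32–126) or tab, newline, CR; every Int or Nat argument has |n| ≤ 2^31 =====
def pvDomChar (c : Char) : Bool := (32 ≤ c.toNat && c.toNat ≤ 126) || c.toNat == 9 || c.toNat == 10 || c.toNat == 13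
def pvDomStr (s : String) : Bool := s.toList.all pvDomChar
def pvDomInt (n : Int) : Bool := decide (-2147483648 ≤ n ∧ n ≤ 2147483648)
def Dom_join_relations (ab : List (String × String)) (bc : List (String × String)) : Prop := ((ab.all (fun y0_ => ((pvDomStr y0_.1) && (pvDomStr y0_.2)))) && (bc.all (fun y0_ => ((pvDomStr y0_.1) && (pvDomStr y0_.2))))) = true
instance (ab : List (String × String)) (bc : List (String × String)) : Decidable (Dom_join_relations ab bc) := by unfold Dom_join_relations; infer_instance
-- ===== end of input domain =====

-- B drops A's defaultdict index and joins by one nested filtered comprehension (simpler, not faster).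

-- ===== PORT A =====
-- build b_to_c : defaultdict(set); then the set comprehension over ab / b_to_c.get(b, ())
def join_relations (ab : List (String × String)) (bc : List (String × String)) : List (String × String) :=
  let b_to_c : PySem.Dict String (PySem.Set String) :=
    bc.foldl (fun d p => d.modify p.1 PySem.Set.empty (fun s => PySem.Set.add s p.2)) PySem.Dict.empty
  ab.foldl (fun out p =>
      (b_to_c.getD p.2 PySem.Set.empty).foldl (fun out c => PySem.Set.add out (p.1, c)) out)
    PySem.Set.empty

-- ===== PORT B =====
-- single nested set comprehension: {(a, c) for (a, b1) in ab for (b2, c) in bc if b1 == b2}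
def join_relations_alt (ab : List (String × String)) (bc : List (String × String)) : List (String × String) :=
  ab.foldl (fun out p =>
      bc.foldl (fun out q => if p.2 == q.1 then PySem.Set.add out (p.1, q.2) else out) out)
    PySem.Set.empty

-- ===== PRECONDITION & SPEC =====
def Spec_join_relations (ab : List (String × String)) (bc : List (String × String)) (out : List (String × String)) : Prop := out = join_relations_alt ab bc
instance (ab : List (String × String)) (bc : List (String × String)) (out : List (String × String)) : Decidable (Spec_join_relations ab bc out) := by unfold Spec_join_relations; infer_instance

-- ===== CLAIM (what is proved, stated in full; the proofs are below) =====
def Claim_equal_join_relations : Prop := ∀ (ab : List (String × String)) (bc : List (String × String)), Dom_join_relations ab bc → Spec_join_relations ab bc (join_relations ab bc)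

-- ===== LEMMAS AND PROOFS =====

-- the getD of the grouping loop is the set of second components of matching pairs, appended to the start value
theorem jr_getD_fold (l : List (String × String)) :
    ∀ (d : PySem.Dict String (PySem.Set String)) (b : String),
    (l.foldl (fun d p => d.modify p.1 PySem.Set.empty (fun s => PySem.Set.add s p.2)) d).getD b PySem.Set.empty
      = PySem.Set.update (d.getD b PySem.Set.empty) ((l.filter (fun p => p.1 == b)).map (·.2)) := by
  induction l with
  | nil => intro d b; simp [PySem.Set.update]
  | cons p l ih =>
      intro d b
      simp only [List.foldl_cons, List.filter_cons]
      by_cases h : p.1 = b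
      · simp only [h, beq_self_eq_true, if_pos, List.map_cons, ih,
          PySem.Set.update_cons, PySem.Dict.getD_modify]
      · have hne : (p.1 == b) = false := by simp [h]
        simp only [hne, if_neg, Bool.false_eq_true, not_false_iff, ih,
          PySem.Dict.getD_modify]
        rw [if_neg (fun hb => h hb.symm)]

-- folding set-add over set(l) equals folding it over l (later duplicates are no-ops)
theorem jr_fold_ofList (a : String) (l : List String) :
    ∀ (out : PySem.Set (String × String)),
    (PySem.Set.ofList l).foldl (fun s c => PySem.Set.add s (a, c)) out
      = l.foldl (fun s c => PySem.Set.add s (a, c)) out := by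
  induction l using List.reverseRecOn with
  | nil => intro out; rfl
  | append_singleton l x ih =>
      intro out
      rw [PySem.Set.ofList_append_singleton, List.foldl_append]
      by_cases hx : x ∈ PySem.Set.ofList l
      · rw [PySem.Set.add_of_mem hx, ih]
        have : (a, x) ∈ l.foldl (fun s c => PySem.Set.add s (a, c)) out := by
          rw [PySem.Set.mem_foldl_add]
          exact Or.inr ⟨x, (PySem.Set.mem_ofList _ _).mp hx, rfl⟩
        simp only [List.foldl_cons, List.foldl_nil, PySem.Set.add_of_mem this]
      · rw [PySem.Set.add_of_not_mem hx, List.foldl_append, ih]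

-- B's inner loop is A's inner loop over the matching second components
theorem jr_inner_filter (a b : String) (bc : List (String × String)) :
    ∀ (out : PySem.Set (String × String)),
    bc.foldl (fun out q => if b == q.1 then PySem.Set.add out (a, q.2) else out) out
      = ((bc.filter (fun q => q.1 == b)).map (·.2)).foldl (fun s c => PySem.Set.add s (a, c)) out := by
  induction bc with
  | nil => intro out; rfl
  | cons q l ih =>
      intro out
      simp only [beq_iff_eq] at ih ⊢
      simp only [List.foldl_cons, List.filter_cons]
      by_cases h : b = q.1
      · rw [if_pos h, if_pos (show (q.1 == b) = true by simp [h])]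
        simp only [List.map_cons, List.foldl_cons]
        exact ih _
      · rw [if_neg h, if_neg (show ¬ ((q.1 == b) = true) from by
            simp only [beq_iff_eq]; exact fun hb => h (Eq.symm hb))]
        exact ih _

theorem jr_main (ab bc : List (String × String)) :
    join_relations ab bc = join_relations_alt ab bc := by
  unfold join_relations join_relations_alt
  generalize (PySem.Set.empty : PySem.Set (String × String)) = out
  induction ab generalizing out with
  | nil => rfl
  | cons p l ih =>
      simp only [List.foldl_cons]
      rw [ih]
      congr 1
      rw [jr_inner_filter, jr_getD_fold, PySem.Dict.getD_empty,
        show PySem.Set.update (PySem.Set.empty : PySem.Set String)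
            ((bc.filter (fun q => q.1 == p.2)).map (·.2))
          = PySem.Set.ofList ((bc.filter (fun q => q.1 == p.2)).map (·.2))
          from PySem.Set.update_nil_left _,
        jr_fold_ofList p.1]

-- ===== VERDICT (by name: the statement is the Claim_ definition above) =====
theorem join_relations_spec : Claim_equal_join_relations := by
  intro ab bc _
  unfold Spec_join_relations
  exact jr_main ab bc
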